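-- pv_equiv track=rewrite | github.com/itsrelative1/qrm | code/historic.py | stress
-- ===== SOURCE A (Python) =====
-- import math
--
-- def stress(loss, VaR):
--
--     years = math.floor(len(loss) / 252)
--     rest = len(loss) % 252
--
--     loss_year = [loss[0 + i * 252 : 252 + i * 252] for i in range(years)]
--     loss_year.append(loss[252 * years : 252 * years + rest])
--
--     VaR_year = [VaR[0 + i * 252 : 252 + i * 252] for i in range(years)]
--     VaR_year.append(VaR[252 * years : 252 * years + rest])
--
--     count_list = []
--
--     for year_loss, year_VaR in zip(loss_year, VaR_year):
--
--         count = 0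
--
--         for x, y in zip(year_loss, year_VaR):
--
--             if x > y:
--                 count += 1
--
--         count_list.append(count)
--
--     return count_list
-- ===== SOURCE B (Python) =====
-- def stress(loss, VaR):
--     years = len(loss) // 252
--     count_list = [0] * (years + 1)
--     m = len(VaR)
--     for i in range(len(loss)):
--         if i < m and loss[i] > VaR[i]:
--             count_list[i // 252] += 1
--     return count_list
-- ===== Notes on version B (the rewrite author's own statement) =====
-- stated objective: simpler
-- what changed: One flat pass over indices bucketing each day into its year by i//252 into a preallocated count array, instead of physically slicing loss and VaR into per-year chunk lists and counting with a nested loop over zipped chunks.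
import Mathlib
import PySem

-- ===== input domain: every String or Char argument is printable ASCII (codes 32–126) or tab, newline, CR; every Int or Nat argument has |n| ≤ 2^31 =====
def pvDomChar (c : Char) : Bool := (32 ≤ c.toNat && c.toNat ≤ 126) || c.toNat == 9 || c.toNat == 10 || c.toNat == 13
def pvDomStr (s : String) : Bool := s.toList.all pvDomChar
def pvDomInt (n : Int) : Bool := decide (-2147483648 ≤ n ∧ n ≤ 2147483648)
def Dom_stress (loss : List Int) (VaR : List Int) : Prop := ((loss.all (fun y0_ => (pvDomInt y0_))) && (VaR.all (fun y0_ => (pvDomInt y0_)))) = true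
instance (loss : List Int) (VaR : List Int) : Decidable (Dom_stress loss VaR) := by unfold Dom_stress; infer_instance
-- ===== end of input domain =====

-- B replaces A's per-year slicing into chunk lists and nested zip loop by one flat pass
-- that buckets each index into its year via i / 252 into a preallocated count array (objective: simpler).


-- ===== PORT A =====
-- math.floor(len(loss)/252) and len(loss) % 252 are exactly Nat division/mod here
-- (lengths are nonnegative and far below 2^53, so the float division is exact enough for floor).
def stress (loss : List Int) (VaR : List Int) : List Int :=
  let years : Nat := loss.length / 252
  let rest : Nat := loss.length % 252
  let loss_year : List (List Int) :=
    ((List.range years).map (fun (i : Nat) =>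
      PySem.List.slice loss (some (0 + (i : Int) * 252)) (some (252 + (i : Int) * 252)))) ++
    [PySem.List.slice loss (some (252 * (years : Int))) (some (252 * (years : Int) + (rest : Int)))]
  let VaR_year : List (List Int) :=
    ((List.range years).map (fun (i : Nat) =>
      PySem.List.slice VaR (some (0 + (i : Int) * 252)) (some (252 + (i : Int) * 252)))) ++
    [PySem.List.slice VaR (some (252 * (years : Int))) (some (252 * (years : Int) + (rest : Int)))]
  (loss_year.zip VaR_year).foldl
    (fun count_list p =>
      count_list ++ [(p.1.zip p.2).foldl (fun count q => if q.2 < q.1 then count + 1 else count) (0 : Int)])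
    []

-- ===== PORT B =====
def stress_alt (loss : List Int) (VaR : List Int) : List Int :=
  let years : Nat := loss.length / 252
  (List.range loss.length).foldl
    (fun count_list i =>
      if i < VaR.length ∧ VaR.getD i 0 < loss.getD i 0 then
        count_list.modify (i / 252) (· + 1)
      else count_list)
    (List.replicate (years + 1) (0 : Int))

-- ===== PRECONDITION & SPEC =====
def Spec_stress (loss : List Int) (VaR : List Int) (out : List Int) : Prop := out = stress_alt loss VaR
instance (loss : List Int) (VaR : List Int) (out : List Int) : Decidable (Spec_stress loss VaR out) := by unfold Spec_stress; infer_instance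

-- ===== CLAIM (what is proved, stated in full; the proofs are below) =====
def Claim_equal_stress : Prop := ∀ (loss : List Int) (VaR : List Int), Dom_stress loss VaR → Spec_stress loss VaR (stress loss VaR)

-- ===== LEMMAS AND PROOFS =====

/-- The chunk predicate both programs count with. -/
def pvHit : Int × Int → Bool := fun q => decide (q.2 < q.1)

/-- Number of VaR exceedances in year `k` of the flat zipped series. -/
def pvC (zs : List (Int × Int)) (k : Nat) : Nat :=
  ((zs.drop (252 * k)).take 252).countP pvHit

-- zip commutes with take and drop
theorem zip_take_take {α β : Type} (l : List α) (l' : List β) (n : Nat) :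
    (l.take n).zip (l'.take n) = (l.zip l').take n := by
  induction l generalizing l' n with
  | nil => simp
  | cons a t ih =>
    cases l' with
    | nil => simp
    | cons b t' => cases n with
      | zero => simp
      | succ m => simp [ih]

theorem zip_drop_drop {α β : Type} (l : List α) (l' : List β) (n : Nat) :
    (l.drop n).zip (l'.drop n) = (l.zip l').drop n := by
  induction l generalizing l' n with
  | nil => simp
  | cons a t ih =>
    cases l' with
    | nil => simp
    | cons b t' => cases n with
      | zero => simp
      | succ m => simp [ih]

/-- Window count over a drop/take chunk as an index count over the whole list. -/
theorem countP_window {α : Type} (p : α → Bool) (d : α) :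
    ∀ (zs : List α) (a b : Nat),
      ((zs.drop a).take b).countP p =
        (List.range zs.length).countP
          (fun i => decide (a ≤ i ∧ i < a + b) && p (zs.getD i d)) := by
  intro zs
  induction zs with
  | nil => simp
  | cons z t ih =>
    intro a b
    simp only [List.length_cons, List.range_succ_eq_map, List.countP_cons, List.countP_map]
    cases a with
    | zero =>
      cases b with
      | zero =>
        simp only [List.take_zero, List.countP_nil]
        have h2 : ((fun i => decide (0 ≤ i ∧ i < 0 + 0) && p ((z :: t).getD i d)) ∘ Nat.succ)
            = (fun _ : Nat => false) := by
          funext i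
          show (decide (0 ≤ i + 1 ∧ i + 1 < 0 + 0) && p ((z :: t).getD (i + 1) d)) = false
          simp
        rw [h2]
        simp
      | succ b' =>
        have h2 : ((fun i => decide (0 ≤ i ∧ i < 0 + (b' + 1)) && p ((z :: t).getD i d)) ∘ Nat.succ)
            = (fun i => decide (0 ≤ i ∧ i < 0 + b') && p (t.getD i d)) := by
          funext i
          show (decide (0 ≤ i + 1 ∧ i + 1 < 0 + (b' + 1)) && p ((z :: t).getD (i + 1) d))
              = (decide (0 ≤ i ∧ i < 0 + b') && p (t.getD i d))
          rw [List.getD_cons_succ,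
              decide_eq_decide.mpr (show (0 ≤ i + 1 ∧ i + 1 < 0 + (b' + 1)) ↔ (0 ≤ i ∧ i < 0 + b') by omega)]
        simp only [List.drop_zero, List.take_succ_cons, List.countP_cons, h2, ← ih 0 b']
        cases hp : p z <;> simp [hp]
    | succ a' =>
      have h2 : ((fun i => decide (a' + 1 ≤ i ∧ i < a' + 1 + b) && p ((z :: t).getD i d)) ∘ Nat.succ)
          = (fun i => decide (a' ≤ i ∧ i < a' + b) && p (t.getD i d)) := by
        funext i
        show (decide (a' + 1 ≤ i + 1 ∧ i + 1 < a' + 1 + b) && p ((z :: t).getD (i + 1) d))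
            = (decide (a' ≤ i ∧ i < a' + b) && p (t.getD i d))
        rw [List.getD_cons_succ,
            decide_eq_decide.mpr (show (a' + 1 ≤ i + 1 ∧ i + 1 < a' + 1 + b) ↔ (a' ≤ i ∧ i < a' + b) by omega)]
      simp only [List.drop_succ_cons, h2, ← ih a' b]
      simp

/-- Restricting a range count by an explicit bound. -/
theorem countP_range_bound (r : Nat → Bool) :
    ∀ (n L : Nat), L ≤ n →
      (List.range n).countP (fun i => decide (i < L) && r i) = (List.range L).countP r := by
  intro n
  induction n with
  | zero => intro L h; interval_cases L; simp
  | succ m ih =>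
    intro L h
    rcases Nat.lt_or_ge L (m + 1) with h' | h'
    · rw [List.range_succ, List.countP_append, ih L (by omega)]
      simp [Nat.not_lt_of_ge (by omega : L ≤ m)]
    · have : L = m + 1 := by omega
      subst this
      apply List.countP_congr
      intro i hi
      simp only [List.mem_range] at hi
      simp [hi]

/-- getD after modify. -/
theorem getD_modify_add (l : List Int) (i k : Nat) :
    (l.modify i (· + 1)).getD k 0 =
      l.getD k 0 + (if k = i ∧ i < l.length then 1 else 0) := by
  rw [List.getD_eq_getElem?_getD, List.getD_eq_getElem?_getD, List.getElem?_modify]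
  by_cases h : i = k
  · subst h
    by_cases hl : i < l.length
    · simp [hl]
    · simp [hl]
  · have h' : ¬ k = i := fun hh => h hh.symm
    simp [h, h']

/-- B's fold step, abstracted over the guard. -/
def pvStep (Q : Nat → Bool) (cl : List Int) (i : Nat) : List Int :=
  if Q i then cl.modify (i / 252) (· + 1) else cl

theorem pvFold_length (Q : Nat → Bool) (n : Nat) (cl : List Int) :
    ((List.range n).foldl (pvStep Q) cl).length = cl.length := by
  induction n generalizing cl with
  | zero => simp
  | succ m ih =>
    rw [List.range_succ, List.foldl_append]
    simp only [List.foldl_cons, List.foldl_nil, pvStep]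
    split <;> simp [ih]

theorem pvFold_getD (Q : Nat → Bool) (n : Nat) (cl : List Int)
    (h : ∀ i, i < n → i / 252 < cl.length) (k : Nat) :
    ((List.range n).foldl (pvStep Q) cl).getD k 0 =
      cl.getD k 0 + ((List.range n).countP (fun i => Q i && decide (i / 252 = k)) : Int) := by
  induction n with
  | zero => simp
  | succ m ih =>
    rw [List.range_succ, List.foldl_append, List.countP_append]
    simp only [List.foldl_cons, List.foldl_nil, List.countP_cons, List.countP_nil, pvStep]
    have hlen : ((List.range m).foldl (pvStep Q) cl).length = cl.length := pvFold_length Q m cl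
    have ihm := ih (fun i hi => h i (by omega))
    by_cases hq : Q m = true
    · rw [if_pos hq, getD_modify_add, ihm, hlen]
      have hm : m / 252 < cl.length := h m (by omega)
      by_cases hk : k = m / 252
      · subst hk
        simp [hq, hm]
        ring
      · have hk' : ¬ m / 252 = k := fun hh => hk hh.symm
        simp [hq, hk, hm, hk']
    · rw [if_neg hq, ihm]
      simp [hq]

/-- A's result is the per-year window counts of the zipped series. -/
theorem stress_eq_map (loss VaR : List Int) :
    stress loss VaR =
      (List.range (loss.length / 252 + 1)).map (fun k => ((pvC (loss.zip VaR) k : Nat) : Int)) := by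
  unfold stress
  simp only []
  set n := loss.length with hn
  set years := n / 252 with hy
  set rest := n % 252 with hr
  -- normalize the slices to drop/take form
  have sliceL : ∀ (xs : List Int) (i : Nat),
      PySem.List.slice xs (some (0 + (i : Int) * 252)) (some (252 + (i : Int) * 252))
        = (xs.drop (252 * i)).take 252 := by
    intro xs i
    have e1 : (0 + (i : Int) * 252) = ((252 * i : Nat) : Int) := by push_cast; ring
    have e2 : (252 + (i : Int) * 252) = ((252 * i + 252 : Nat) : Int) := by push_cast; ring
    rw [e1, e2, PySem.List.slice_natCast]
    congr 1
    omega
  have sliceR : ∀ (xs : List Int),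
      PySem.List.slice xs (some (252 * (years : Int))) (some (252 * (years : Int) + (rest : Int)))
        = (xs.drop (252 * years)).take rest := by
    intro xs
    have e1 : (252 * (years : Int)) = ((252 * years : Nat) : Int) := by push_cast; ring
    have e2 : (252 * (years : Int) + (rest : Int)) = ((252 * years + rest : Nat) : Int) := by push_cast; ring
    rw [e2]
    rw [e1]
    rw [PySem.List.slice_natCast]
    congr 1
    omega
  -- put the chunks in drop/take form, then zip the two chunk lists pointwise
  have mapL : (List.range years).map (fun i : Nat =>
        PySem.List.slice loss (some (0 + (i : Int) * 252)) (some (252 + (i : Int) * 252)))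
      = (List.range years).map (fun i : Nat => (loss.drop (252 * i)).take 252) :=
    List.map_congr_left (fun i _ => sliceL loss i)
  have mapV : (List.range years).map (fun i : Nat =>
        PySem.List.slice VaR (some (0 + (i : Int) * 252)) (some (252 + (i : Int) * 252)))
      = (List.range years).map (fun i : Nat => (VaR.drop (252 * i)).take 252) :=
    List.map_congr_left (fun i _ => sliceL VaR i)
  rw [mapL, mapV, sliceR loss, sliceR VaR]
  rw [List.zip_append (by simp), List.zip_map']
  rw [PySem.List.foldl_append_singleton_eq_map]
  rw [List.range_succ]
  simp only [List.map_append, List.map_map, List.nil_append]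
  congr 1
  · -- full years
    apply List.map_congr_left
    intro i hi
    simp only [Function.comp_apply]
    rw [PySem.List.foldl_ite_add_one, zip_take_take, zip_drop_drop]
    simp only [zero_add, pvC]
    rfl
  · -- the trailing partial year
    simp only [List.zip_cons_cons, List.zip_nil_right, List.map_cons, List.map_nil]
    rw [PySem.List.foldl_ite_add_one, zip_take_take, zip_drop_drop]
    have hlen : ((loss.zip VaR).drop (252 * years)).length ≤ rest := by
      simp only [List.length_drop, List.length_zip]
      omega
    rw [List.take_of_length_le hlen, ← List.take_of_length_le (le_trans hlen (by omega : rest ≤ 252))]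
    simp only [zero_add, pvC]
    rfl

/-- B's guard, over the flat index. -/
def pvQ (loss VaR : List Int) (i : Nat) : Bool :=
  decide (i < VaR.length ∧ VaR.getD i 0 < loss.getD i 0)

theorem stress_alt_getD (loss VaR : List Int) (k : Nat) :
    (stress_alt loss VaR).getD k 0 =
      ((List.range loss.length).countP
        (fun i => pvQ loss VaR i && decide (i / 252 = k)) : Int) := by
  unfold stress_alt
  simp only []
  have hstep : (fun (count_list : List Int) (i : Nat) =>
      if i < VaR.length ∧ VaR.getD i 0 < loss.getD i 0 then
        count_list.modify (i / 252) (· + 1)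
      else count_list) = pvStep (pvQ loss VaR) := by
    funext cl i
    simp [pvStep, pvQ]
  rw [hstep, pvFold_getD (pvQ loss VaR) loss.length (List.replicate (loss.length / 252 + 1) 0)
    (fun i hi => by
      simp only [List.length_replicate]
      have := Nat.div_le_div_right (c := 252) (Nat.le_of_lt_succ (Nat.lt_succ_of_lt hi))
      have : i / 252 ≤ loss.length / 252 := Nat.div_le_div_right (Nat.le_of_lt hi)
      omega) k]
  simp

/-- The flat-index count over a year equals the window count. -/
theorem count_eq_window (loss VaR : List Int) (k : Nat) :
    (List.range loss.length).countP
        (fun i => pvQ loss VaR i && decide (i / 252 = k)) =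
      pvC (loss.zip VaR) k := by
  set zs := loss.zip VaR with hzs
  have hL : zs.length = min loss.length VaR.length := by simp [hzs]
  have hLn : zs.length ≤ loss.length := by omega
  have step1 : (List.range loss.length).countP
      (fun i => pvQ loss VaR i && decide (i / 252 = k)) =
      (List.range loss.length).countP
      (fun i => decide (i < zs.length) &&
        (decide (252 * k ≤ i ∧ i < 252 * k + 252) && pvHit (zs.getD i (0, 0)))) := by
    apply List.countP_congr
    intro i hi
    simp only [List.mem_range] at hi
    have hdiv : (i / 252 = k) ↔ (252 * k ≤ i ∧ i < 252 * k + 252) := by omega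
    by_cases hm : i < VaR.length
    · have hiz : i < zs.length := by omega
      have hget : zs.getD i (0, 0) = (loss.getD i 0, VaR.getD i 0) := by
        rw [List.getD_eq_getElem?_getD, List.getElem?_eq_getElem (by omega : i < zs.length)]
        simp only [hzs, List.getElem_zip, Option.getD_some]
        rw [List.getD_eq_getElem?_getD, List.getElem?_eq_getElem hi,
            List.getD_eq_getElem?_getD, List.getElem?_eq_getElem hm]
        simp
      simp only [pvHit, hget]
      simp [pvQ, hm, hiz, hdiv, Bool.and_comm]
    · have hiz : ¬ i < zs.length := by omega
      simp [pvQ, hm, hiz]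
  rw [step1, countP_range_bound _ loss.length zs.length hLn, pvC,
      countP_window pvHit (0, 0) zs (252 * k) 252]

-- ===== VERDICT (by name: the statement is the Claim_ definition above) =====
theorem stress_spec : Claim_equal_stress := by
  intro loss VaR _
  unfold Spec_stress
  rw [stress_eq_map]
  have hlen : (stress_alt loss VaR).length = loss.length / 252 + 1 := by
    unfold stress_alt
    simp only []
    have hstep : (fun (count_list : List Int) (i : Nat) =>
        if i < VaR.length ∧ VaR.getD i 0 < loss.getD i 0 then
          count_list.modify (i / 252) (· + 1)
        else count_list) = pvStep (pvQ loss VaR) := by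
      funext cl i
      simp [pvStep, pvQ]
    rw [hstep, pvFold_length]
    simp
  apply List.ext_getElem
  · simp [hlen]
  · intro k h1 h2
    have hk : k < loss.length / 252 + 1 := by simpa [hlen] using h2
    rw [← List.getD_eq_getElem _ 0, ← List.getD_eq_getElem _ 0,
        stress_alt_getD, count_eq_window]
    rw [List.getD_eq_getElem _ 0 (by simpa using hk)]
    simp
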